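-- pv_equiv track=rewrite | github.com/Yawn-Sean/Daily_CF_Problems | daily_problems/2025/03/0322/personal_submission/cf617c_liryc.py | solve
-- ===== SOURCE A (Python) =====
-- def solve(n: int, x1: int, y1: int, x2: int, y2: int, flowers: list[list[int]]) -> int:
--     rq1, rq2 = 0, 0
--     sa = []
--     for x, y in flowers:
--         rq = (x - x1) ** 2 + (y - y1) ** 2
--         sa.append((rq, x, y))
--     sa.sort()
--     ans = rq1 = sa[-1][0]
--     for i in range(n - 1, -1, -1):
--         _, x, y = sa[i]
--         rq1 = sa[i - 1][0] if i else 0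
--         rq2 = max(rq2, (x - x2) ** 2 + (y - y2) ** 2)
--         ans = min(ans, rq1 + rq2)
--     return ans
-- ===== SOURCE B (Python) =====
-- def solve(n: int, x1: int, y1: int, x2: int, y2: int, flowers: list[list[int]]) -> int:
--     # Sort once by squared distance to fountain 1, then brute force: the cost of
--     # every split point is evaluated independently, the second radius by a fresh
--     # scan of its slice -- no running/suffix maximum is maintained anywhere.
--     ts = sorted(((fx - x1) ** 2 + (fy - y1) ** 2, fx, fy) for fx, fy in flowers)
--
--     def r2(k: int) -> int:  # smallest second radius covering ts[k:n]
--         return max(((fx - x2) ** 2 + (fy - y2) ** 2 for _, fx, fy in ts[k:n]), default=0)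
--
--     return min([ts[-1][0]] + [(ts[k - 1][0] if k else 0) + r2(k) for k in range(n)])
-- ===== Notes on version B (the rewrite author's own statement) =====
-- stated objective: alternative
-- what changed: A maintains a running suffix maximum of fountain-2 distances fused with a running answer minimum in one backward pass; B keeps no accumulators at all: after the same sort it evaluates every split point independently, recomputing the second radius by a fresh scan of its slice, and takes one min() over the list of candidate costs.
import Mathlib
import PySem

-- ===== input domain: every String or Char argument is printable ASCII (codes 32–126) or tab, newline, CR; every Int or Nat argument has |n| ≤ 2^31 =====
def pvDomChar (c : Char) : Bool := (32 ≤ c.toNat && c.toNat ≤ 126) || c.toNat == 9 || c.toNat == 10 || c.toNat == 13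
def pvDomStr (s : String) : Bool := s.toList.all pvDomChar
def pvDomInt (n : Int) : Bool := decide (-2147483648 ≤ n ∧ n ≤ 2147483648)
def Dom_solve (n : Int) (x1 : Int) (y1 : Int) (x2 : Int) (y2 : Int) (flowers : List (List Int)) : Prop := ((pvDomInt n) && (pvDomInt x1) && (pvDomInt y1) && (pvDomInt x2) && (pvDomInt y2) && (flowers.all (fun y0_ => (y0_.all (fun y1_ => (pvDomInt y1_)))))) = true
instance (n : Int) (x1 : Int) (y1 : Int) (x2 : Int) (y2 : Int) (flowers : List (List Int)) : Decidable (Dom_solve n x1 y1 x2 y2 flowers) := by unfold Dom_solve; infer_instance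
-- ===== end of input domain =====

-- B replaces A's fused backward sweep (running suffix maximum + running answer minimum in one
-- state machine) by a quadratic brute force: each split point's cost is evaluated independently,
-- the second radius by a fresh scan of its slice (objective: alternative; B is not faster).

-- ===== PORT A =====
-- shared sort key: Python's lexicographic tuple comparison on (rq, x, y)
def pvKey (t : Int × Int × Int) : Lex (Int × Lex (Int × Int)) := toLex (t.1, toLex (t.2.1, t.2.2))

-- 'for x, y in flowers: … (rq, x, y)' — row access via pyGetD; exact on rows of length 2 (Pre_)
def pvTriple (x1 y1 : Int) (f : List Int) : Int × Int × Int :=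
  let x := PySem.List.pyGetD f 0 0
  let y := PySem.List.pyGetD f 1 0
  ((x - x1) ^ 2 + (y - y1) ^ 2, x, y)

def solve (n : Int) (x1 : Int) (y1 : Int) (x2 : Int) (y2 : Int) (flowers : List (List Int)) : Int :=
  -- sa = []; for x, y in flowers: sa.append((rq, x, y)); sa.sort()
  let sa := PySem.List.sorted (flowers.foldl (fun acc f => acc ++ [pvTriple x1 y1 f]) []) pvKey
  -- ans = rq1 = sa[-1][0]   (IndexError on empty sa: excluded by Pre_)
  let ans0 := (PySem.List.pyGetD sa (-1) (0, 0, 0)).1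
  -- for i in range(n - 1, -1, -1): … state (rq2, ans)
  let st := (PySem.List.pyRange (n - 1) (-1) (-1)).foldl
    (fun (st : Int × Int) i =>
      (max st.1 (((PySem.List.pyGetD sa i (0, 0, 0)).2.1 - x2) ^ 2 + ((PySem.List.pyGetD sa i (0, 0, 0)).2.2 - y2) ^ 2),
       min st.2 ((if i ≠ 0 then (PySem.List.pyGetD sa (i - 1) (0, 0, 0)).1 else 0)
         + max st.1 (((PySem.List.pyGetD sa i (0, 0, 0)).2.1 - x2) ^ 2 + ((PySem.List.pyGetD sa i (0, 0, 0)).2.2 - y2) ^ 2))))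
    (0, ans0)
  st.2

-- ===== PORT B =====
-- 'def r2(k): return max((… for _, fx, fy in ts[k:n]), default=0)'
def pvR2 (x2 y2 n : Int) (ts : List (Int × Int × Int)) (k : Int) : Int :=
  PySem.List.maxD ((PySem.List.slice ts (some k) (some n)).map
    (fun t => (t.2.1 - x2) ^ 2 + (t.2.2 - y2) ^ 2)) (fun v => v) 0

def solve_alt (n : Int) (x1 : Int) (y1 : Int) (x2 : Int) (y2 : Int) (flowers : List (List Int)) : Int :=
  -- ts = sorted((rq, x, y) for x, y in flowers)
  let ts := PySem.List.sorted (flowers.map (fun f => pvTriple x1 y1 f)) pvKey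
  -- min([ts[-1][0]] + [(ts[k-1][0] if k else 0) + r2(k) for k in range(n)])
  -- (the candidate list is never empty — its head is ts[-1][0] — so Python's min returns)
  (PySem.List.min? ((PySem.List.pyGetD ts (-1) (0, 0, 0)).1 ::
      (PySem.List.pyRange 0 n 1).map (fun k =>
        (if k ≠ 0 then (PySem.List.pyGetD ts (k - 1) (0, 0, 0)).1 else 0) + pvR2 x2 y2 n ts k))
    (fun v => v)).getD 0

-- ===== PRECONDITION & SPEC =====
-- Pre_ is exactly where A returns: A raises IndexError on empty flowers (sa[-1]) and on
-- n > len(flowers) (sa[i] in the loop), and ValueError on rows not of length 2 (unpacking).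
def Pre_solve (n : Int) (x1 : Int) (y1 : Int) (x2 : Int) (y2 : Int) (flowers : List (List Int)) : Prop :=
  flowers ≠ [] ∧ n ≤ (flowers.length : Int) ∧ ∀ f ∈ flowers, f.length = 2
instance (n : Int) (x1 : Int) (y1 : Int) (x2 : Int) (y2 : Int) (flowers : List (List Int)) : Decidable (Pre_solve n x1 y1 x2 y2 flowers) := by unfold Pre_solve; infer_instance

def pvWitness_solve : Int × Int × Int × Int × Int × List (List Int) := (2, 0, 0, 3, 3, [[0, 1], [2, 0]])

def Spec_solve (n : Int) (x1 : Int) (y1 : Int) (x2 : Int) (y2 : Int) (flowers : List (List Int)) (out : Int) : Prop := out = solve_alt n x1 y1 x2 y2 flowers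
instance (n : Int) (x1 : Int) (y1 : Int) (x2 : Int) (y2 : Int) (flowers : List (List Int)) (out : Int) : Decidable (Spec_solve n x1 y1 x2 y2 flowers out) := by unfold Spec_solve; infer_instance

-- ===== CLAIM (what is proved, stated in full; the proofs are below) =====
def Claim_equal_solve : Prop := ∀ (n : Int) (x1 : Int) (y1 : Int) (x2 : Int) (y2 : Int) (flowers : List (List Int)), Dom_solve n x1 y1 x2 y2 flowers → Pre_solve n x1 y1 x2 y2 flowers → Spec_solve n x1 y1 x2 y2 flowers (solve n x1 y1 x2 y2 flowers)

-- ===== LEMMAS AND PROOFS =====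

-- squared distance of a sorted triple to fountain 2
def pvD2 (x2 y2 : Int) (t : Int × Int × Int) : Int := (t.2.1 - x2) ^ 2 + (t.2.2 - y2) ^ 2

-- suffix max of pvD2 over sa[k:nn], base 0 (= A's rq2 once the loop has reached index k)
def pvSM (x2 y2 : Int) (nn : Nat) (sa : List (Int × Int × Int)) (k : Nat) : Int :=
  (((sa.take nn).drop k).map (pvD2 x2 y2)).foldr max 0

-- squared radius of fountain 1 covering the first k sorted flowers
def pvR1 (sa : List (Int × Int × Int)) (k : Nat) : Int :=
  if k = 0 then 0 else (sa.getD (k - 1) (0, 0, 0)).1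

-- cost of the split point k: first k sorted flowers to fountain 1, sorted [k:nn) to fountain 2
def pvCand (x2 y2 : Int) (nn : Nat) (sa : List (Int × Int × Int)) (k : Nat) : Int :=
  pvR1 sa k + pvSM x2 y2 nn sa k

-- abstract form of A's answer accumulator over indices m-1 … 0
def pvW (x2 y2 : Int) (nn : Nat) (sa : List (Int × Int × Int)) : Nat → Int → Int
  | 0, a0 => a0
  | m + 1, a0 => pvW x2 y2 nn sa m (min a0 (pvCand x2 y2 nn sa m))

theorem pvD2_nonneg (x2 y2 : Int) (t : Int × Int × Int) : 0 ≤ pvD2 x2 y2 t := by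
  have := sq_nonneg (t.2.1 - x2)
  have := sq_nonneg (t.2.2 - y2)
  rw [pvD2]; positivity

theorem pvSM_self (x2 y2 : Int) (nn : Nat) (sa : List (Int × Int × Int)) : pvSM x2 y2 nn sa nn = 0 := by
  rw [pvSM, List.drop_eq_nil_of_le (by rw [List.length_take]; omega)]
  rfl

theorem pvSM_rec (x2 y2 : Int) (nn : Nat) (sa : List (Int × Int × Int)) (k : Nat)
    (hk : k < nn) (hnn : nn ≤ sa.length) :
    pvSM x2 y2 nn sa k = max (pvD2 x2 y2 (sa.getD k (0, 0, 0))) (pvSM x2 y2 nn sa (k + 1)) := by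
  have hkl : k < (sa.take nn).length := by rw [List.length_take]; omega
  rw [pvSM, List.drop_eq_getElem_cons hkl, List.map_cons, List.foldr_cons, pvSM]
  congr 2
  rw [List.getElem_take, List.getD_eq_getElem sa (0, 0, 0) (by omega)]

-- 'rq1 = sa[i-1][0] if i else 0' is pvR1 at a Nat index
theorem pvR1_cast (sa : List (Int × Int × Int)) (m : Nat) :
    (if (m : Int) ≠ 0 then (PySem.List.pyGetD sa ((m : Int) - 1) (0, 0, 0)).1 else 0) = pvR1 sa m := by
  cases m with
  | zero => simp [pvR1]
  | succ m' =>
    have h1 : ((m' + 1 : Nat) : Int) - 1 = (m' : Int) := by push_cast; ring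
    rw [if_pos (by exact_mod_cast Nat.succ_ne_zero m'), h1]
    simp [pvR1, PySem.List.pyGetD_natCast]

-- A's backward loop computes pvW, provided the rq2 component starts at the suffix max from m
theorem pvAloop (x2 y2 : Int) (nn : Nat) (sa : List (Int × Int × Int)) (hnn : nn ≤ sa.length) :
    ∀ (m : Nat), m ≤ nn → ∀ (a0 : Int),
    ((PySem.List.pyRange ((m : Int) - 1) (-1) (-1)).foldl
      (fun (st : Int × Int) i =>
        (max st.1 (((PySem.List.pyGetD sa i (0, 0, 0)).2.1 - x2) ^ 2 + ((PySem.List.pyGetD sa i (0, 0, 0)).2.2 - y2) ^ 2),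
         min st.2 ((if i ≠ 0 then (PySem.List.pyGetD sa (i - 1) (0, 0, 0)).1 else 0)
           + max st.1 (((PySem.List.pyGetD sa i (0, 0, 0)).2.1 - x2) ^ 2 + ((PySem.List.pyGetD sa i (0, 0, 0)).2.2 - y2) ^ 2))))
      (pvSM x2 y2 nn sa m, a0)).2 = pvW x2 y2 nn sa m a0 := by
  intro m
  induction m with
  | zero =>
    intro _ a0
    rw [show ((0 : Nat) : Int) - 1 = -1 by norm_num,
        PySem.List.pyRange_neg_one_eq_nil (by norm_num)]
    rfl
  | succ m ih =>
    intro hm a0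
    have hcast : ((m + 1 : Nat) : Int) - 1 = (m : Int) := by push_cast; ring
    rw [hcast, PySem.List.pyRange_neg_one_cons (by omega), List.foldl_cons]
    have hD : max (pvSM x2 y2 nn sa (m + 1))
        (((PySem.List.pyGetD sa (m : Int) (0, 0, 0)).2.1 - x2) ^ 2 + ((PySem.List.pyGetD sa (m : Int) (0, 0, 0)).2.2 - y2) ^ 2)
        = pvSM x2 y2 nn sa m := by
      rw [pvSM_rec x2 y2 nn sa m (by omega) hnn, max_comm]
      simp [pvD2, PySem.List.pyGetD_natCast]
    have hstep :
        ((max (pvSM x2 y2 nn sa (m + 1)) (((PySem.List.pyGetD sa (m : Int) (0, 0, 0)).2.1 - x2) ^ 2 + ((PySem.List.pyGetD sa (m : Int) (0, 0, 0)).2.2 - y2) ^ 2),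
          min a0 ((if (m : Int) ≠ 0 then (PySem.List.pyGetD sa ((m : Int) - 1) (0, 0, 0)).1 else 0)
            + max (pvSM x2 y2 nn sa (m + 1)) (((PySem.List.pyGetD sa (m : Int) (0, 0, 0)).2.1 - x2) ^ 2 + ((PySem.List.pyGetD sa (m : Int) (0, 0, 0)).2.2 - y2) ^ 2)))
          : Int × Int)
        = (pvSM x2 y2 nn sa m, min a0 (pvCand x2 y2 nn sa m)) := by
      rw [hD, pvR1_cast, pvCand]
    rw [show pvW x2 y2 nn sa (m + 1) a0 = pvW x2 y2 nn sa m (min a0 (pvCand x2 y2 nn sa m)) from rfl]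
    rw [← ih (by omega) (min a0 (pvCand x2 y2 nn sa m)), ← hstep]

-- pulling a min out of a foldl min
theorem pvFoldlMinPull (l : List Int) : ∀ (a x : Int), l.foldl min (min a x) = min (l.foldl min a) x := by
  induction l with
  | nil => intro a x; rfl
  | cons y t ih =>
    intro a x
    rw [List.foldl_cons, List.foldl_cons, min_right_comm a x y, ih (min a y) x]

-- A's accumulator is the running min over the candidates 0 … m-1
theorem pvW_eq_foldl (x2 y2 : Int) (nn : Nat) (sa : List (Int × Int × Int)) :
    ∀ (m : Nat) (a0 : Int), pvW x2 y2 nn sa m a0 = ((List.range m).map (pvCand x2 y2 nn sa)).foldl min a0 := by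
  intro m
  induction m with
  | zero => intro a0; rfl
  | succ m ih =>
    intro a0
    rw [show pvW x2 y2 nn sa (m + 1) a0 = pvW x2 y2 nn sa m (min a0 (pvCand x2 y2 nn sa m)) from rfl, ih,
        List.range_succ, List.map_append, List.foldl_append, List.map_singleton, List.foldl_cons,
        List.foldl_nil, ← pvFoldlMinPull]

-- pulling a max out of a foldr max
theorem pvFoldrMaxPull (l : List Int) : ∀ (a x : Int), l.foldr max (max a x) = max x (l.foldr max a) := by
  induction l with
  | nil => intro a x; exact max_comm a x
  | cons y t ih => intro a x; rw [List.foldr_cons, List.foldr_cons, ih a x, max_left_comm]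

theorem pvFoldlMaxFoldr (l : List Int) : ∀ a : Int, l.foldl max a = l.foldr max a := by
  induction l with
  | nil => intro a; rfl
  | cons x t ih => intro a; rw [List.foldl_cons, List.foldr_cons, ih (max a x), pvFoldrMaxPull]

-- Python's max(l, default=0) on a nonempty list of nonnegative ints is the 0-based max fold
theorem pvMaxD_eq (l : List Int) (hne : l ≠ []) (h0 : ∀ y ∈ l, 0 ≤ y) :
    PySem.List.maxD l (fun v => v) 0 = l.foldr max 0 := by
  cases l with
  | nil => exact absurd rfl hne
  | cons x t =>
    have hx : max 0 x = x := max_eq_right (h0 x List.mem_cons_self)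
    rw [List.foldr_cons, ← pvFoldrMaxPull t 0 x, hx]
    rw [show PySem.List.maxD (x :: t) (fun v => v) 0 = t.foldl max x by
      simp [PySem.List.maxD, PySem.List.max?_id_cons]]
    rw [pvFoldlMaxFoldr t x]

-- B's r2(k) is the suffix max pvSM at a Nat index
theorem pvR2_eq (x2 y2 : Int) (nn : Nat) (sa : List (Int × Int × Int)) (j : Nat)
    (hj : j < nn) (hnn : nn ≤ sa.length) :
    pvR2 x2 y2 (nn : Int) sa (j : Int) = pvSM x2 y2 nn sa j := by
  rw [pvR2, pvSM, PySem.List.slice_natCast, ← List.drop_take]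
  refine pvMaxD_eq _ ?_ ?_
  · rw [Ne, List.map_eq_nil_iff, ← List.length_eq_zero_iff, List.length_drop, List.length_take]
    omega
  · intro y hy
    rcases List.mem_map.mp hy with ⟨t, -, rfl⟩
    exact pvD2_nonneg x2 y2 t

-- ===== VERDICT (by name: the statement is the Claim_ definition above) =====
theorem solve_spec : Claim_equal_solve := by
  intro n x1 y1 x2 y2 flowers _ hpre
  obtain ⟨hne, hnle, -⟩ := hpre
  show solve n x1 y1 x2 y2 flowers = solve_alt n x1 y1 x2 y2 flowers
  simp only [solve, solve_alt, PySem.List.foldl_append_singleton_eq_map, List.nil_append]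
  set sa := PySem.List.sorted (flowers.map (fun f => pvTriple x1 y1 f)) pvKey with hsadef
  have hlen : sa.length = flowers.length := by
    rw [hsadef, PySem.List.length_sorted, List.length_map]
  by_cases hn : n ≤ 0
  · -- n ≤ 0: both loops are empty, both sides are sa[-1][0]
    rw [PySem.List.pyRange_neg_one_eq_nil (by omega), PySem.List.pyRange_one,
      show (n - 0).toNat = 0 by omega]
    simp [PySem.List.min?_id_cons]
  · -- 0 < n ≤ len: A's sweep and B's list of split costs cover the same candidates
    rw [not_le] at hn
    set nn : Nat := n.toNat with hnndef
    have hneq : n = (nn : Int) := by omega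
    have hnnle : nn ≤ sa.length := by omega
    rw [hneq]
    -- A's side
    have hAv := pvAloop x2 y2 nn sa hnnle nn le_rfl (PySem.List.pyGetD sa (-1) (0, 0, 0)).1
    rw [pvSM_self x2 y2 nn sa] at hAv
    rw [hAv, pvW_eq_foldl]
    -- B's side
    have hrange : PySem.List.pyRange 0 ((nn : Int)) 1
        = (List.range nn).map (fun k : Nat => ((k : Int))) := by
      rw [PySem.List.pyRange_one, show (((nn : Int)) - 0).toNat = nn by omega]
      apply List.map_congr_left
      intro k _
      omega
    rw [hrange, List.map_map, PySem.List.min?_id_cons, Option.getD_some]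
    congr 1
    apply List.map_congr_left
    intro k hk
    have hklt : k < nn := List.mem_range.mp hk
    show pvCand x2 y2 nn sa k = (if (k : Int) ≠ 0 then (PySem.List.pyGetD sa ((k : Int) - 1) (0, 0, 0)).1 else 0)
        + pvR2 x2 y2 (nn : Int) sa (k : Int)
    rw [pvR1_cast, pvR2_eq x2 y2 nn sa k hklt hnnle, pvCand]
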